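-- pv_equiv track=rewrite | github.com/Sumsum/sumsum | nimda/base.py | line_fields
-- ===== SOURCE A (Python) =====
-- def line_fields(fields):
--     """
--     Makes lines of two fields, basically turns any vector
--     into a 2 columns wide matrix.
--     """
--     lines = []
--     counter = 0
--     while counter < len(fields):
--         try:
--             next_field = fields[counter + 1]
--         except IndexError:
--             line = (fields[counter],)
--             counter = counter + 1
--         else:
--             line = (fields[counter], next_field)
--             counter = counter + 2
--         lines.append(line)
--     return lines
-- ===== SOURCE B (Python) =====
-- def line_fields(fields):
--     """
--     Makes lines of two fields, basically turns any vector
--     into a 2 columns wide matrix.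
--     """
--     return [tuple(fields[i:i + 2]) for i in range(0, len(fields), 2)]
-- ===== Notes on version B (the rewrite author's own statement) =====
-- stated objective: simpler
-- what changed: Replaced the while loop with mutable counter, try/except IndexError lookahead and variable-step advance by a single comprehension over range(0, len(fields), 2) whose slice naturally truncates to one element at an odd tail.
import Mathlib
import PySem

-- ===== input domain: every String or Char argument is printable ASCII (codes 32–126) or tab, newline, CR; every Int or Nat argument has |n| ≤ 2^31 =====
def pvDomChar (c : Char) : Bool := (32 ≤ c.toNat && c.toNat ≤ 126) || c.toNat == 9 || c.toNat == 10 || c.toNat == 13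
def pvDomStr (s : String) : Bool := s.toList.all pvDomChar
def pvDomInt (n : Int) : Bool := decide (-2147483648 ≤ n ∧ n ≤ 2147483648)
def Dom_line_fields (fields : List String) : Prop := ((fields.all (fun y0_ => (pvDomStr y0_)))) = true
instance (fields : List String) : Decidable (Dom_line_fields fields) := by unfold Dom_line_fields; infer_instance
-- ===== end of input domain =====

-- B replaces A's while loop + try/except lookahead by one stride-2 slice comprehension (objective: simpler).

-- ===== PORT A =====
-- the while loop: lines/counter are the loop state; fields[counter+1] is the try'd lookahead
def lineFieldsLoop (fields : List String) (lines : List (List String)) (counter : Nat) :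
    List (List String) :=
  if h : counter < fields.length then
    match PySem.List.pyGet? fields ((counter : Int) + 1) with
    | none => lineFieldsLoop fields (lines ++ [[fields[counter]]]) (counter + 1)
    | some nextField => lineFieldsLoop fields (lines ++ [[fields[counter], nextField]]) (counter + 2)
  else lines
termination_by fields.length - counter

def line_fields (fields : List String) : List (List String) :=
  lineFieldsLoop fields [] 0

-- ===== PORT B =====
def line_fields_alt (fields : List String) : List (List String) :=
  (PySem.List.pyRange 0 (fields.length : Int) 2).map
    (fun i => PySem.List.slice fields (some i) (some (i + 2)))

-- ===== PRECONDITION & SPEC =====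
def Spec_line_fields (fields : List String) (out : List (List String)) : Prop := out = line_fields_alt fields
instance (fields : List String) (out : List (List String)) : Decidable (Spec_line_fields fields out) := by unfold Spec_line_fields; infer_instance

-- ===== CLAIM (what is proved, stated in full; the proofs are below) =====
def Claim_equal_line_fields : Prop := ∀ (fields : List String), Dom_line_fields fields → Spec_line_fields fields (line_fields fields)

-- ===== LEMMAS AND PROOFS =====

-- the common characterisation: pair up the list front-to-back
def chunk : List String → List (List String)
  | [] => []
  | [a] => [[a]]
  | a :: b :: t => [a, b] :: chunk t

theorem loop_eq_chunk (fields : List String) :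
    ∀ (n counter : Nat) (lines : List (List String)), fields.length - counter ≤ n →
      lineFieldsLoop fields lines counter = lines ++ chunk (fields.drop counter) := by
  intro n
  induction n with
  | zero =>
      intro counter lines h
      have hge : fields.length ≤ counter := by omega
      rw [lineFieldsLoop]
      simp [Nat.not_lt.mpr hge, List.drop_eq_nil_of_le hge, chunk]
  | succ n ih =>
      intro counter lines h
      rw [lineFieldsLoop]
      by_cases hc : counter < fields.length
      · simp only [hc, dif_pos]
        have hcast : (counter : Int) + 1 = ((counter + 1 : Nat) : Int) := by push_cast; ring
        rw [hcast, PySem.List.pyGet?_natCast]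
        rcases Nat.lt_or_ge (counter + 1) fields.length with h2 | h2
        · simp only [List.getElem?_eq_getElem h2]
          rw [ih (counter + 2) _ (by omega)]
          rw [List.drop_eq_getElem_cons hc, List.drop_eq_getElem_cons h2]
          simp [chunk]
        · simp only [List.getElem?_eq_none h2]
          rw [ih (counter + 1) _ (by omega)]
          rw [List.drop_eq_getElem_cons hc, List.drop_eq_nil_of_le h2]
          simp [chunk]
      · simp [hc, List.drop_eq_nil_of_le (Nat.not_lt.mp hc), chunk]

theorem range_eq_chunk (fields : List String) :
    (List.range ((fields.length + 1) / 2)).map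
      (fun k => (fields.drop (2 * k)).take 2) = chunk fields := by
  induction fields using chunk.induct with
  | case1 => simp [chunk]
  | case2 a => simp [chunk]
  | case3 a b t ih =>
      have hlen : ((a :: b :: t).length + 1) / 2 = (t.length + 1) / 2 + 1 := by
        simp only [List.length_cons]
        omega
      rw [hlen, List.range_succ_eq_map, List.map_cons, List.map_map]
      refine congrArg₂ List.cons rfl ?_
      rw [← ih]
      apply List.map_congr_left
      intro k _
      show List.take 2 (List.drop (2 * (k + 1)) (a :: b :: t)) = _
      have h2k : 2 * (k + 1) = 2 * k + 1 + 1 := by ring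
      rw [h2k, List.drop_succ_cons, List.drop_succ_cons]

theorem alt_eq_chunk (fields : List String) : line_fields_alt fields = chunk fields := by
  unfold line_fields_alt
  rw [PySem.List.pyRange_of_pos 0 (fields.length : Int) (by norm_num)]
  have hm : (if (0 : Int) < (fields.length : Int)
      then (((fields.length : Int) - 0 + 2 - 1) / 2).toNat else 0) = (fields.length + 1) / 2 := by
    split <;> omega
  rw [hm, List.map_map, ← range_eq_chunk fields]
  apply List.map_congr_left
  intro k _
  have h1 : (0 : Int) + 2 * (k : Int) = ((2 * k : Nat) : Int) := by push_cast; ring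
  have h2 : ((2 * k : Nat) : Int) + 2 = ((2 * k + 2 : Nat) : Int) := by push_cast; ring
  simp only [Function.comp, h1, h2]
  rw [PySem.List.slice_natCast]
  congr 1
  omega

-- ===== VERDICT (by name: the statement is the Claim_ definition above) =====
theorem line_fields_spec : Claim_equal_line_fields := by
  intro fields _
  unfold Spec_line_fields line_fields
  rw [loop_eq_chunk fields fields.length 0 [] (by omega), alt_eq_chunk]
  simp
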